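-- pv_equiv track=rewrite | github.com/sarweshshah/gait_analysis | usecases/medical_gait_analysis/medical_gait_events.py | _group_consecutive_frames
-- ===== SOURCE A (Python) =====
-- from typing import Dict, List, Tuple, Optional
--
-- def _group_consecutive_frames(frames: List[int], min_duration: int = 5) -> List[Tuple[int, int]]:
--     """Group consecutive frame indices into episodes."""
--     if not frames:
--         return []
--
--     episodes = []
--     start_frame = frames[0]
--     end_frame = frames[0]
--
--     for i in range(1, len(frames)):
--         if frames[i] == frames[i-1] + 1:
--             # Consecutive frame
--             end_frame = frames[i]
--         else:
--             # Gap found, save episode if long enough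
--             if end_frame - start_frame + 1 >= min_duration:
--                 episodes.append((start_frame, end_frame))
--             start_frame = frames[i]
--             end_frame = frames[i]
--
--     # Don't forget the last episode
--     if end_frame - start_frame + 1 >= min_duration:
--         episodes.append((start_frame, end_frame))
--
--     return episodes
-- ===== SOURCE B (Python) =====
-- from typing import Dict, List, Tuple, Optional
--
-- def _group_consecutive_frames(frames: List[int], min_duration: int = 5) -> List[Tuple[int, int]]:
--     """Group consecutive frame indices into episodes.
--
--     Declarative three-stage form: run starts and run ends are computed as two
--     independent filtered zips of the list with its shifted self, then zipped
--     together and filtered by the minimum duration."""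
--     starts = [b for a, b in zip([None] + frames, frames) if a is None or b != a + 1]
--     ends = [a for a, b in zip(frames, frames[1:] + [None]) if b is None or b != a + 1]
--     return [(s, e) for s, e in zip(starts, ends) if e - s + 1 >= min_duration]
-- ===== Notes on version B (the rewrite author's own statement) =====
-- stated objective: alternative
-- what changed: Replaces A's single stateful scan (running start/end accumulators with a trailing flush) by three declarative stages: run starts as a filtered zip of the list with its left-shifted self, run ends as a filtered zip with its right-shifted self, then a zip of the two filtered by the minimum duration.
import Mathlib
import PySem

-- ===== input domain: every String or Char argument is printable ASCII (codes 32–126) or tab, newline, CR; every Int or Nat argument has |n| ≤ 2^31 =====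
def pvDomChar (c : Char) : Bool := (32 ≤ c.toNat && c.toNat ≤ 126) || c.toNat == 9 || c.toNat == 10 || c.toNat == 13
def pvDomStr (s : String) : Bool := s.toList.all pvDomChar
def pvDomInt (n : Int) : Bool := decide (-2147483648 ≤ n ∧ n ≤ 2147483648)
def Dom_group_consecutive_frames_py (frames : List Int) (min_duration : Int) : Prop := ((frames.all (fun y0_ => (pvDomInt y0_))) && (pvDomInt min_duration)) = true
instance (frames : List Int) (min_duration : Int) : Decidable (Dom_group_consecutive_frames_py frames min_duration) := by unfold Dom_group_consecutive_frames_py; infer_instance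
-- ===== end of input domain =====

-- B replaces A's stateful single pass (running start/end + trailing flush) by three
-- declarative stages: run starts and run ends as two independent filtered zips of the
-- list with its shifted self, zipped and filtered; alternative decomposition, same O(n).


-- ===== PORT A =====
-- A's loop over range(1, len(frames)) compares frames[i] with frames[i-1]; it is
-- ported as a foldl over the tail carrying (episodes, start, end, prev) where
-- prev is the value frames[i-1] the Python reads at each step.
def group_consecutive_frames_py (frames : List Int) (min_duration : Int) : List (Int × Int) :=
  match frames with
  | [] => []
  | f0 :: rest =>
    let st := rest.foldl (fun (st : List (Int × Int) × Int × Int × Int) fi =>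
      let (eps, s, e, prev) := st
      if fi = prev + 1 then (eps, s, fi, fi)
      else ((if e - s + 1 ≥ min_duration then eps ++ [(s, e)] else eps), fi, fi, fi))
      ([], f0, f0, f0)
    if st.2.2.1 - st.2.1 + 1 ≥ min_duration then st.1 ++ [(st.2.1, st.2.2.1)] else st.1

-- ===== PORT B =====
-- Source B's three comprehensions, transliterated: Python None is Option.none, the
-- short-circuit 'a is None or b != a + 1' is Option.elim with true for none.
def group_consecutive_frames_py_alt (frames : List Int) (min_duration : Int) : List (Int × Int) :=
  let starts := (((none :: frames.map some).zip frames).filter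
      (fun p => p.1.elim true (fun a => decide (p.2 ≠ a + 1)))).map Prod.snd
  let ends := ((frames.zip ((frames.tail.map some) ++ [none])).filter
      (fun p => p.2.elim true (fun b => decide (b ≠ p.1 + 1)))).map Prod.fst
  (starts.zip ends).filter (fun p => decide (p.2 - p.1 + 1 ≥ min_duration))

-- ===== PRECONDITION & SPEC =====
def Spec_group_consecutive_frames_py (frames : List Int) (min_duration : Int) (out : List (Int × Int)) : Prop := out = group_consecutive_frames_py_alt frames min_duration
instance (frames : List Int) (min_duration : Int) (out : List (Int × Int)) : Decidable (Spec_group_consecutive_frames_py frames min_duration out) := by unfold Spec_group_consecutive_frames_py; infer_instance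

-- ===== CLAIM (what is proved, stated in full; the proofs are below) =====
def Claim_equal_group_consecutive_frames_py : Prop := ∀ (frames : List Int) (min_duration : Int), Dom_group_consecutive_frames_py frames min_duration → Spec_group_consecutive_frames_py frames min_duration (group_consecutive_frames_py frames min_duration)

-- ===== LEMMAS AND PROOFS =====

-- Recursive characterisation shared by both proofs: episodes produced from a current
-- run with start s, last seen element e, and remaining frames.
def pvSpecRun (md s e : Int) : List Int → List (Int × Int)
  | [] => if e - s + 1 ≥ md then [(s, e)] else []
  | x :: xs =>
    if x = e + 1 then pvSpecRun md s x xs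
    else (if e - s + 1 ≥ md then [(s, e)] else []) ++ pvSpecRun md x x xs

-- Recursive forms of B's starts (after its first element) and ends comprehensions.
def pvSTail (prev : Int) : List Int → List Int
  | [] => []
  | y :: ys => if y = prev + 1 then pvSTail y ys else y :: pvSTail y ys

def pvEnds (x : Int) : List Int → List Int
  | [] => [x]
  | y :: ys => if y = x + 1 then pvEnds y ys else x :: pvEnds y ys

theorem pvA_loop_eq (md : Int) (rest : List Int) :
    ∀ (eps : List (Int × Int)) (s e : Int),
    (let st := rest.foldl (fun (st : List (Int × Int) × Int × Int × Int) fi =>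
      let (eps, s, e, prev) := st
      if fi = prev + 1 then (eps, s, fi, fi)
      else ((if e - s + 1 ≥ md then eps ++ [(s, e)] else eps), fi, fi, fi))
      (eps, s, e, e)
     if st.2.2.1 - st.2.1 + 1 ≥ md then st.1 ++ [(st.2.1, st.2.2.1)] else st.1)
      = eps ++ pvSpecRun md s e rest := by
  induction rest with
  | nil =>
    intro eps s e
    simp only [List.foldl_nil, pvSpecRun]
    split_ifs <;> simp
  | cons x xs ih =>
    intro eps s e
    simp only [List.foldl_cons, pvSpecRun]
    by_cases hx : x = e + 1
    · simp only [hx]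
      exact ih eps s (e + 1)
    · simp only [if_neg hx]
      rw [ih]
      split_ifs <;> simp

-- B's starts comprehension (past its first kept element) computes pvSTail.
theorem pvStarts_eq (xs : List Int) : ∀ (prev : Int),
    (((xs.map some).zip xs.tail).filter
      (fun p : Option Int × Int => p.1.elim true (fun a => decide (p.2 ≠ a + 1)))).map Prod.snd
    = pvSTail (xs.headD prev) xs.tail := by
  induction xs with
  | nil => intro prev; simp [pvSTail]
  | cons x xs ih =>
    intro prev
    cases xs with
    | nil => simp [pvSTail]
    | cons y ys =>
      have h := ih x
      simp only [List.headD_cons, List.tail_cons] at h ⊢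
      simp only [List.map_cons, List.zip_cons_cons, List.filter_cons, pvSTail]
      by_cases hy : y = x + 1
      · have hd : ((some x : Option Int).elim true (fun a => decide (y ≠ a + 1))) = false := by
          simp [hy]
        simp only [hd, if_pos hy, Bool.false_eq_true, if_false]
        simpa using h
      · have hd : ((some x : Option Int).elim true (fun a => decide (y ≠ a + 1))) = true := by
          simp [hy]
        simp only [hd, if_neg hy, if_true]
        simpa using h

-- B's ends comprehension computes pvEnds.
theorem pvEnds_eq (x : Int) (xs : List Int) :
    (((x :: xs).zip ((xs.map some) ++ [none])).filter
      (fun p : Int × Option Int => p.2.elim true (fun b => decide (b ≠ p.1 + 1)))).map Prod.fst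
    = pvEnds x xs := by
  induction xs generalizing x with
  | nil => simp [pvEnds]
  | cons y ys ih =>
    simp only [List.map_cons, List.cons_append, List.zip_cons_cons, List.filter_cons, pvEnds]
    by_cases hy : y = x + 1
    · have hd : ((some y : Option Int).elim true (fun b => decide (b ≠ x + 1))) = false := by
        simp [hy]
      rw [hd]
      simp only [Bool.false_eq_true, if_false, if_pos hy]
      exact ih y
    · have hd : ((some y : Option Int).elim true (fun b => decide (b ≠ x + 1))) = true := by
        simp [hy]
      rw [hd]
      simp only [if_true, if_neg hy]
      simpa using ih y

-- zipping starts with ends and filtering is exactly pvSpecRun.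
theorem pvZip_eq (md : Int) (xs : List Int) : ∀ (s e : Int),
    ((( s :: pvSTail e xs).zip (pvEnds e xs)).filter
      (fun p : Int × Int => decide (p.2 - p.1 + 1 ≥ md)))
    = pvSpecRun md s e xs := by
  induction xs with
  | nil =>
    intro s e
    simp only [pvSTail, pvEnds, pvSpecRun, List.zip_cons_cons, List.zip_nil_right,
      List.filter_cons, List.filter_nil]
    by_cases h : e - s + 1 ≥ md <;> simp [h]
  | cons x xs ih =>
    intro s e
    by_cases hx : x = e + 1
    · simp only [pvSTail, pvEnds, pvSpecRun, if_pos hx]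
      exact ih s x
    · simp only [pvSTail, pvEnds, pvSpecRun, if_neg hx]
      rw [List.zip_cons_cons, List.filter_cons, ih x x]
      by_cases h : e - s + 1 ≥ md <;> simp [h]

-- ===== VERDICT (by name: the statement is the Claim_ definition above) =====
theorem group_consecutive_frames_py_spec : Claim_equal_group_consecutive_frames_py := by
  intro frames md _
  unfold Spec_group_consecutive_frames_py
  cases frames with
  | nil => simp [group_consecutive_frames_py, group_consecutive_frames_py_alt]
  | cons f0 rest =>
    have hA := pvA_loop_eq md rest [] f0 f0
    have hS : (((none :: (f0 :: rest).map some).zip (f0 :: rest)).filter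
        (fun p : Option Int × Int => p.1.elim true (fun a => decide (p.2 ≠ a + 1)))).map Prod.snd
        = f0 :: pvSTail f0 rest := by
      simp only [List.map_cons, List.zip_cons_cons, List.filter_cons]
      have h := pvStarts_eq (f0 :: rest) f0
      simp only [List.headD_cons, List.tail_cons] at h
      simpa using h
    have hE := pvEnds_eq f0 rest
    show group_consecutive_frames_py (f0 :: rest) md = _
    unfold group_consecutive_frames_py_alt
    simp only [List.tail_cons]
    rw [hS, hE, pvZip_eq md rest f0 f0]
    exact hA
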